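-- pv_equiv track=rewrite | github.com/vai-arch/tsumevault | go_problems_generar_all_collections.py | transform_sgf
-- ===== SOURCE A (Python) =====
-- def normalize_comment(comment_text):
--     """Convierte el contenido de un comentario al formato estándar."""
--     upper = comment_text.upper()
--     has_right   = 'RIGHT'   in upper
--     has_correct = 'CORRECT' in upper
--     has_wrong   = 'WRONG'   in upper
--
--     if has_right or has_correct:
--         return 'RIGHT'
--     if has_wrong:
--         return 'WRONG'
--     # Comentario sin marker de resultado — lo dejamos tal cual
--     return comment_text
--
-- def transform_sgf(text):
--     """
--     Recorre el SGF carácter a carácter y normaliza los valores de C[...].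
--     Respeta escapes \] dentro de los valores.
--     """
--     out = []
--     i = 0
--     n = len(text)
--
--     while i < n:
--         # Buscar "C["
--         if text[i] == 'C' and i + 1 < n and text[i+1] == '[':
--             out.append('C[')
--             i += 2
--             # Leer hasta el ] de cierre respetando escapes
--             val = []
--             while i < n:
--                 c = text[i]
--                 if c == '\\' and i + 1 < n:
--                     val.append(c)
--                     val.append(text[i+1])
--                     i += 2
--                 elif c == ']':
--                     i += 1
--                     break
--                 else:
--                     val.append(c)
--                     i += 1
--             original = ''.join(val)
--             normalized = normalize_comment(original)
--             out.append(normalized)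
--             out.append(']')
--         else:
--             out.append(text[i])
--             i += 1
--
--     return ''.join(out)
-- ===== SOURCE B (Python) =====
-- def normalize_comment(comment_text):
--     """Convierte el contenido de un comentario al formato estándar."""
--     upper = comment_text.upper()
--     if 'RIGHT' in upper or 'CORRECT' in upper:
--         return 'RIGHT'
--     if 'WRONG' in upper:
--         return 'WRONG'
--     return comment_text
--
--
-- def _close(s):
--     """Index of the unescaped closing ']' of a comment value s, or -1.
--
--     A ']' closes the value iff the run of backslashes immediately before it
--     has even length (an odd run means the ']' is escaped)."""
--     j = s.find(']')
--     if j == -1: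
--         return -1
--     b = j
--     while b > 0 and s[b - 1] == '\\':
--         b -= 1
--     if (j - b) % 2 == 0:
--         return j
--     t = _close(s[j + 1:])
--     return -1 if t == -1 else j + 1 + t
--
--
-- def transform_sgf(text):
--     """Jump from one 'C[' marker to the next with str.find and rebuild the
--     text from whole slices, instead of walking it character by character."""
--     k = text.find('C[')
--     if k == -1:
--         return text
--     body = text[k + 2:]
--     end = _close(body)
--     if end == -1:
--         return text[:k] + 'C[' + normalize_comment(body) + ']'
--     return (text[:k] + 'C[' + normalize_comment(body[:end]) + ']'
--             + transform_sgf(body[end + 1:]))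
-- ===== Notes on version B (the rewrite author's own statement) =====
-- stated objective: faster
-- what changed: Replaces A's character-by-character while-loop state machine with a slice-based rebuild: str.find jumps straight to each comment marker and to each candidate closing bracket, an unescaped closer is recognised by the parity of the backslash run immediately before it, and the output is assembled from whole string slices by recursion on the remainder.
import Mathlib
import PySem

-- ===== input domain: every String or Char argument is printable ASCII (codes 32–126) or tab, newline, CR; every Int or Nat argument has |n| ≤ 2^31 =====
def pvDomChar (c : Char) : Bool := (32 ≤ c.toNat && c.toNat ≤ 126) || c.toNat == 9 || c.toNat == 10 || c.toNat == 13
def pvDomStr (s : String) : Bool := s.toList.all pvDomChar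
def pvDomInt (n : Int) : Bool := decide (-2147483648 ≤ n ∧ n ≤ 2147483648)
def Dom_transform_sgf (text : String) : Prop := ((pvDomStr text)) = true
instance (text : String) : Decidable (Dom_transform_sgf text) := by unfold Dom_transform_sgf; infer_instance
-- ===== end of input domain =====

-- B rebuilds the text from whole slices, jumping between 'C[' markers with str.find

-- B rebuilds the text from whole slices, jumping between 'C[' markers with str.find
-- and locating each closing ']' by the parity of the backslash run before it,
-- instead of A's character-by-character state machine (objective: faster by a constant factor).

-- ===== PORT A =====
-- normalize_comment, shared verbatim by A and B (the two Pythons carry the identical helper)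
def normChars (cs : List Char) : List Char :=
  let upper := PySem.Chars.upper cs
  let has_right := PySem.Chars.isIn "RIGHT".toList upper
  let has_correct := PySem.Chars.isIn "CORRECT".toList upper
  let has_wrong := PySem.Chars.isIn "WRONG".toList upper
  if has_right || has_correct then "RIGHT".toList
  else if has_wrong then "WRONG".toList
  else cs

-- A's inner while loop: (val so far, chars from position i) ↦ (final val, chars after the closing ])
def pvA_value : List Char → List Char → List Char × List Char
  | [], val => (val, [])
  | c :: d :: rest, val =>
    if c = '\\' then pvA_value rest (val ++ [c, d])
    else if c = ']' then (val, d :: rest)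
    else pvA_value (d :: rest) (val ++ [c])
  | [c], val =>                     -- last character: 'c == "\\" and i+1 < n' is False
    if c = ']' then (val, [])
    else (val ++ [c], [])           -- append c, then i = n and the loop exits
termination_by cs _ => cs.length
decreasing_by all_goals (simp; try omega)

-- termination helper for pvA_main, cited in its decreasing_by
theorem pvA_value_rest_le (cs val : List Char) : (pvA_value cs val).2.length ≤ cs.length := by
  induction cs, val using pvA_value.induct <;> simp_all [pvA_value]
  all_goals omega

-- A's outer while loop over (out, chars from position i)
def pvA_main : List Char → List Char → List Char
  | [], out => out
  | c :: rest, out =>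
    if c = 'C' ∧ rest.head? = some '[' then
      let p := pvA_value rest.tail []
      pvA_main p.2 (out ++ 'C' :: '[' :: (normChars p.1 ++ [']']))
    else pvA_main rest (out ++ [c])
termination_by cs _ => cs.length
decreasing_by
  · have h1 := pvA_value_rest_le rest.tail []
    simp [List.length_tail] at h1 ⊢
    omega
  · simp

def transform_sgf (text : String) : String := String.ofList (pvA_main text.toList [])

-- ===== PORT B =====
-- the backslash-counting while loop of _close: returns the final value of b
-- (s.getD (b-1) is exact for s[b-1]: the loop only reads indices 0 ≤ b-1 < j ≤ len(s))
def pvBack (s : List Char) : Nat → Nat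
  | 0 => 0
  | b + 1 => if s.getD b ' ' = '\\' then pvBack s b else b + 1

-- termination helper for pvClose, cited in its decreasing_by
theorem pv_find_close_pos (s : List Char) (h : PySem.Chars.find s [']'] ≠ -1) : 0 < s.length := by
  rcases (PySem.Chars.find_ne_neg_one_iff s [']']).mp h with ⟨t, u, hs⟩
  simp [← hs]

-- _close: find-based search for the unescaped closing ']' (slices s[j+1:] ported as drop, exact for j ≥ 0)
def pvClose (s : List Char) : Int :=
  let j := PySem.Chars.find s [']']
  if hj : j = -1 then -1
  else
    let jn := j.toNat
    let b := pvBack s jn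
    if (jn - b) % 2 = 0 then (jn : Int)
    else
      let t := pvClose (s.drop (jn + 1))
      if t = -1 then -1 else (jn : Int) + 1 + t
termination_by s.length
decreasing_by
  have := pv_find_close_pos s hj
  simp; omega

-- termination helper for pvBmain, cited in its decreasing_by
theorem pv_find_pair_len (cs : List Char) (h : PySem.Chars.find cs ['C', '['] ≠ -1) :
    2 ≤ cs.length := by
  rcases (PySem.Chars.find_ne_neg_one_iff cs ['C', '[']).mp h with ⟨t, u, hs⟩
  have : cs.length = t.length + 2 + u.length := by rw [← hs]; simp; omega
  omega

-- B's transform_sgf: find the next 'C[', slice out the comment value, recurse on the rest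
-- (slices text[:k], text[k+2:], body[:end], body[end+1:] ported as take/drop, exact for these nonnegative bounds)
def pvBmain (cs : List Char) : List Char :=
  let k := PySem.Chars.find cs ['C', '[']
  if hk : k = -1 then cs
  else
    let kn := k.toNat
    let body := cs.drop (kn + 2)
    let e := pvClose body
    if e = -1 then cs.take kn ++ 'C' :: '[' :: (normChars body ++ [']'])
    else
      let en := e.toNat
      cs.take kn ++ 'C' :: '[' :: (normChars (body.take en) ++ [']'])
        ++ pvBmain (body.drop (en + 1))
termination_by cs.length
decreasing_by
  have := pv_find_pair_len cs hk
  simp; omega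

def transform_sgf_alt (text : String) : String := String.ofList (pvBmain text.toList)

-- ===== PRECONDITION & SPEC =====
def Spec_transform_sgf (text : String) (out : String) : Prop := out = transform_sgf_alt text
instance (text : String) (out : String) : Decidable (Spec_transform_sgf text out) := by unfold Spec_transform_sgf; infer_instance

-- ===== CLAIM (what is proved, stated in full; the proofs are below) =====
def Claim_equal_transform_sgf : Prop := ∀ (text : String), Dom_transform_sgf text → Spec_transform_sgf text (transform_sgf text)

-- ===== LEMMAS AND PROOFS =====

-- step lemmas
theorem pvA_value_esc (d : Char) (cs val : List Char) :
    pvA_value ('\\' :: d :: cs) val = pvA_value cs (val ++ ['\\', d]) := by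
  simp [pvA_value]

theorem pvA_value_close (cs val : List Char) : pvA_value (']' :: cs) val = (val, cs) := by
  cases cs <;> simp [pvA_value]

theorem pvA_value_other (c : Char) (cs val : List Char) (h1 : c ≠ '\\') (h2 : c ≠ ']') :
    pvA_value (c :: cs) val = pvA_value cs (val ++ [c]) := by
  cases cs <;> simp [pvA_value, h1, h2]

theorem pvA_value_acc (cs w : List Char) : ∀ v, pvA_value cs (v ++ w) =
    (v ++ (pvA_value cs w).1, (pvA_value cs w).2) := by
  induction cs, w using pvA_value.induct with
  | case1 val => intro v; simp [pvA_value]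
  | case2 d rest val ih =>
    intro v
    rw [pvA_value_esc, pvA_value_esc, List.append_assoc]
    exact ih v
  | case3 d rest val h =>
    intro v; rw [pvA_value_close, pvA_value_close]
  | case4 c d rest val h1 h2 ih =>
    intro v
    rw [pvA_value_other c _ _ h1 h2, pvA_value_other c _ _ h1 h2, List.append_assoc]
    exact ih v
  | case5 val => intro v; simp [pvA_value]
  | case6 c val h => intro v; simp [pvA_value, h]

theorem pvA_value_no_close (cs val : List Char) (h : ']' ∉ cs) :
    pvA_value cs val = (val ++ cs, []) := by
  induction cs, val using pvA_value.induct with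
  | case1 val => simp [pvA_value]
  | case2 d rest val ih =>
    rw [pvA_value_esc, ih (by simp_all)]
    simp
  | case3 d rest val h2 => simp at h
  | case4 c d rest val h1 h2 ih =>
    rw [pvA_value_other c _ _ h1 h2, ih (by simp_all)]
    simp
  | case5 val => simp at h
  | case6 c val hc => simp_all [pvA_value]

theorem pvA_value_skip_aux : ∀ (n : Nat) (Q : List Char), Q.length ≤ n → ']' ∉ Q →
    Q.getLast? ≠ some '\\' → ∀ rest val, pvA_value (Q ++ rest) val = pvA_value rest (val ++ Q) := by
  intro n
  induction n with
  | zero =>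
    intro Q hn _ _ rest val
    rw [List.eq_nil_of_length_eq_zero (Nat.le_zero.mp hn)]
    simp
  | succ n ih =>
    intro Q hn hni hl rest val
    match Q with
    | [] => simp
    | c :: Q1 =>
      by_cases hc : c = '\\'
      · subst hc
        match Q1 with
        | [] => simp at hl
        | d :: Q2 =>
          have h1 : ']' ∉ Q2 := by simp_all
          have h2 : Q2.getLast? ≠ some '\\' := by
            match Q2 with
            | [] => simp
            | e :: Q3 => simpa [List.getLast?_cons_cons] using hl
          rw [show ('\\' :: d :: Q2) ++ rest = '\\' :: d :: (Q2 ++ rest) by simp,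
            pvA_value_esc, ih Q2 (by simp at hn ⊢; omega) h1 h2 rest (val ++ ['\\', d])]
          simp
      · simp only [List.mem_cons, not_or] at hni
        have hcr : c ≠ ']' := Ne.symm hni.1
        have h2 : Q1.getLast? ≠ some '\\' := by
          match Q1 with
          | [] => simp
          | e :: Q3 => simpa [List.getLast?_cons_cons] using hl
        rw [show (c :: Q1) ++ rest = c :: (Q1 ++ rest) by simp,
          pvA_value_other c _ _ hc hcr, ih Q1 (by simp at hn ⊢; omega) hni.2 h2 rest (val ++ [c])]
        simp

theorem pvA_value_skip (Q : List Char) (hni : ']' ∉ Q) (hl : Q.getLast? ≠ some '\\')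
    (rest val : List Char) : pvA_value (Q ++ rest) val = pvA_value rest (val ++ Q) :=
  pvA_value_skip_aux Q.length Q le_rfl hni hl rest val

theorem pvA_value_run (r : Nat) (tail val : List Char) :
    pvA_value (List.replicate r '\\' ++ ']' :: tail) val =
      if r % 2 = 0 then (val ++ List.replicate r '\\', tail)
      else pvA_value tail (val ++ List.replicate r '\\' ++ [']']) := by
  match r with
  | 0 => simp [pvA_value_close]
  | 1 => simp [List.replicate, pvA_value_esc]
  | r + 2 =>
    rw [show List.replicate (r + 2) '\\' ++ ']' :: tail
        = '\\' :: '\\' :: (List.replicate r '\\' ++ ']' :: tail) by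
      simp [List.replicate_succ], pvA_value_esc, pvA_value_run r tail (val ++ ['\\', '\\'])]
    have : (r + 2) % 2 = r % 2 := by omega
    rw [this]
    by_cases h : r % 2 = 0 <;> simp [h, List.replicate_succ]
termination_by r

theorem pv_singleton_prefix (x : Char) (s : List Char) : [x] <+: s ↔ s.head? = some x := by
  constructor
  · rintro ⟨t, rfl⟩; rfl
  · intro h
    cases s with
    | nil => simp at h
    | cons a t => simp at h; subst h; exact ⟨t, rfl⟩

-- every list splits off its maximal trailing backslash run
theorem pv_decomp (P : List Char) :
    ∃ Q r, P = Q ++ List.replicate r '\\' ∧ Q.getLast? ≠ some '\\' := by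
  induction P using List.reverseRecOn with
  | nil => exact ⟨[], 0, by simp, by simp⟩
  | append_singleton l a ih =>
    rcases ih with ⟨Q, r, hP, hQ⟩
    by_cases ha : a = '\\'
    · refine ⟨Q, r + 1, ?_, hQ⟩
      subst ha hP
      simp [List.replicate_succ']
    · exact ⟨l ++ [a], 0, by simp, by simp [ha]⟩

theorem pvBack_aux (Q : List Char) (hQ : Q.getLast? ≠ some '\\') (r : Nat) (rest : List Char) :
    ∀ j, j ≤ r → pvBack (Q ++ (List.replicate r '\\' ++ rest)) (Q.length + j) = Q.length := by
  intro j
  induction j with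
  | zero =>
    intro _
    rw [Nat.add_zero]
    cases hQl : Q.length with
    | zero => simp [pvBack]
    | succ m =>
      have hm : m < Q.length := by omega
      simp only [pvBack, List.getD_append _ _ _ _ hm, List.getD_eq_getElem _ _ hm]
      have : Q.getLast? = some Q[m] := by
        rw [List.getLast?_eq_getElem?, hQl]
        simp [List.getElem?_eq_getElem (by omega : m < Q.length)]
      rw [if_neg (by intro he; exact hQ (he ▸ this))]
  | succ j ih =>
    intro hj
    rw [show Q.length + (j + 1) = (Q.length + j) + 1 by omega]
    simp only [pvBack]
    rw [List.getD_append_right _ _ _ _ (by omega), show Q.length + j - Q.length = j by omega]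
    rw [List.getD_append _ _ _ _ (by simp; omega), List.getD_eq_getElem _ _ (by simp; omega)]
    simp only [List.getElem_replicate, if_true]
    exact ih (by omega)

theorem pvBack_spec (Q : List Char) (hQ : Q.getLast? ≠ some '\\') (r : Nat) (rest : List Char) :
    pvBack (Q ++ (List.replicate r '\\' ++ rest)) (Q.length + r) = Q.length :=
  pvBack_aux Q hQ r rest r le_rfl

-- find s [']'] characterisations
theorem pv_find_close_neg (s : List Char) (h : PySem.Chars.find s [']'] = -1) : ']' ∉ s := by
  have := (PySem.Chars.find_eq_neg_one_iff s [']']).mp h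
  rw [List.singleton_infix_iff] at this
  exact this

theorem pv_find_close_pos_spec (s : List Char) (h : PySem.Chars.find s [']'] ≠ -1) :
    ']' ∉ s.take (PySem.Chars.find s [']']).toNat ∧
      s = s.take (PySem.Chars.find s [']']).toNat ++
        ']' :: s.drop ((PySem.Chars.find s [']']).toNat + 1) := by
  have h0 : 0 ≤ PySem.Chars.find s [']'] := by
    have := PySem.Chars.neg_one_le_find s [']']
    omega
  obtain ⟨hpre, hmin⟩ := PySem.Chars.find_spec (s := s) (sub := [']']) h0
  set jn := (PySem.Chars.find s [']']).toNat with hjn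
  have hdrop : s.drop jn = ']' :: s.drop (jn + 1) := by
    have hh := (pv_singleton_prefix ']' (s.drop jn)).mp hpre
    cases hd : s.drop jn with
    | nil => rw [hd] at hh; simp at hh
    | cons a t =>
      rw [hd] at hh; simp at hh; subst hh
      have : t = s.drop (jn + 1) := by
        have := List.tail_drop (l := s) (i := jn)
        rw [hd] at this; simp at this; exact this
      rw [this]
  constructor
  · intro hmem
    obtain ⟨i, hi, hgi⟩ := List.getElem_of_mem hmem
    have hilen : i < s.length := by simp at hi; omega
    have hij : i < jn := by simp at hi; omega
    apply hmin i hij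
    rw [pv_singleton_prefix]
    rw [List.getElem_take] at hgi
    rw [List.head?_drop]
    simp [List.getElem?_eq_getElem hilen, hgi]
  · conv_lhs => rw [← List.take_append_drop jn s]
    rw [hdrop]

theorem pvClose_spec (s : List Char) :
    (pvClose s = -1 → pvA_value s [] = (s, [])) ∧
    (pvClose s ≠ -1 → 0 ≤ pvClose s ∧
      pvA_value s [] = (s.take (pvClose s).toNat, s.drop ((pvClose s).toNat + 1))) := by
  by_cases hj : PySem.Chars.find s [']'] = -1
  · have hcl : pvClose s = -1 := by rw [pvClose]; simp [hj]
    refine ⟨fun _ => ?_, fun hne => absurd hcl hne⟩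
    rw [pvA_value_no_close s [] (pv_find_close_neg s hj)]
    simp
  · obtain ⟨hnot, hsplit⟩ := pv_find_close_pos_spec s hj
    have h0 : 0 ≤ PySem.Chars.find s [']'] := by
      have := PySem.Chars.neg_one_le_find s [']']
      omega
    set jn := (PySem.Chars.find s [']']).toNat with hjn
    set P := s.take jn with hP
    set T := s.drop (jn + 1) with hT
    obtain ⟨Q, r, hPQ, hQl⟩ := pv_decomp P
    have hjlen : jn = P.length := by
      have := PySem.Chars.find_le_length s [']']
      rw [hP, List.length_take]
      omega
    have hQr : jn = Q.length + r := by rw [hjlen, hPQ]; simp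
    have hback : pvBack s jn = Q.length := by
      conv_lhs => rw [hsplit, hPQ, List.append_assoc, hQr]
      exact pvBack_spec Q hQl r (']' :: T)
    have hniQ : ']' ∉ Q := fun hm => hnot (by rw [hPQ]; exact List.mem_append_left _ hm)
    have hval : pvA_value s [] = pvA_value (List.replicate r '\\' ++ ']' :: T) Q := by
      conv_lhs => rw [hsplit, hPQ, List.append_assoc]
      rw [pvA_value_skip Q hniQ hQl _ []]
      simp
    by_cases hev : (jn - pvBack s jn) % 2 = 0
    · have hcl : pvClose s = (jn : Int) := by
        rw [pvClose]
        simp [hj, ← hjn, hev]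
      have hrev : r % 2 = 0 := by rw [hback] at hev; omega
      refine ⟨fun hc => absurd (hcl ▸ hc) (by simp), fun _ => ⟨by rw [hcl]; omega, ?_⟩⟩
      rw [hcl, Int.toNat_natCast, hval, pvA_value_run, if_pos hrev, ← hPQ]
    · have hrodd : ¬ r % 2 = 0 := by rw [hback] at hev; omega
      have hvalT : pvA_value s [] = pvA_value T (P ++ [']']) := by
        rw [hval, pvA_value_run, if_neg hrodd, hPQ]
      obtain ⟨ihn, ihs⟩ := pvClose_spec T
      have hcl : pvClose s =
          (if pvClose T = -1 then -1 else (jn : Int) + 1 + pvClose T) := by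
        rw [pvClose]
        simp only [hj, dite_false, ← hjn, ← hT]
        rw [if_neg hev]
      have hTacc : ∀ w, pvA_value T w = (w ++ (pvA_value T []).1, (pvA_value T []).2) := by
        intro w
        have := pvA_value_acc T [] w
        simpa using this
      by_cases hTc : pvClose T = -1
      · have : pvClose s = -1 := by rw [hcl, if_pos hTc]
        refine ⟨fun _ => ?_, fun hne => absurd this hne⟩
        rw [hvalT, hTacc, ihn hTc]
        simp [hsplit]
      · obtain ⟨ht0, htval⟩ := ihs hTc
        set tn := (pvClose T).toNat with htn
        have hclv : pvClose s = (jn : Int) + 1 + pvClose T := by rw [hcl, if_neg hTc]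
        have hne : pvClose s ≠ -1 := by rw [hclv]; omega
        refine ⟨fun hc => absurd hc hne, fun _ => ⟨by rw [hclv]; omega, ?_⟩⟩
        have htoNat : (pvClose s).toNat = jn + 1 + tn := by
          rw [hclv, htn]
          omega
        rw [htoNat, hvalT, hTacc, htval]
        simp only [Prod.mk.injEq]
        constructor
        · show P ++ [']'] ++ T.take tn = s.take (jn + 1 + tn)
          conv_rhs => rw [hsplit]
          rw [show jn + 1 + tn = P.length + 1 + tn by omega, List.take_append]
          rw [List.take_of_length_le (by omega : P.length ≤ P.length + 1 + tn)]
          rw [show P.length + 1 + tn - P.length = tn + 1 by omega, List.take_succ_cons]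
          simp
        · show T.drop (tn + 1) = s.drop (jn + 1 + tn + 1)
          conv_rhs => rw [hsplit]
          rw [show jn + 1 + tn + 1 = P.length + 1 + tn + 1 by omega, List.drop_append]
          rw [List.drop_eq_nil_of_le (by omega : P.length ≤ P.length + 1 + tn + 1)]
          rw [show P.length + 1 + tn + 1 - P.length = (tn + 1) + 1 by omega, List.drop_succ_cons]
          simp
termination_by s.length
decreasing_by
  have := pv_find_close_pos s hj
  simp; omega

theorem pvA_main_acc (cs w : List Char) : ∀ v, pvA_main cs (v ++ w) = v ++ pvA_main cs w := by
  induction cs, w using pvA_main.induct with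
  | case1 out => intro v; simp [pvA_main]
  | case2 c rest out h p ih =>
    intro v
    simp only [pvA_main, if_pos h]
    rw [List.append_assoc]
    exact ih v
  | case3 c rest out h ih =>
    intro v
    rw [pvA_main, pvA_main, if_neg h, if_neg h, List.append_assoc]
    exact ih v

theorem pv_prefix_pair (c : Char) (u : List Char) :
    ['C', '['] <+: c :: u ↔ c = 'C' ∧ u.head? = some '[' := by
  cases u with
  | nil =>
    constructor
    · rintro ⟨t, ht⟩; simp at ht
    · rintro ⟨_, h⟩; simp at h
  | cons b u' =>
    constructor
    · rintro ⟨t, ht⟩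
      simp at ht
      exact ⟨ht.1.symm, by simp [ht.2.1.symm]⟩
    · rintro ⟨rfl, hu⟩
      simp at hu
      subst hu
      exact ⟨u', rfl⟩

theorem pvA_main_walk (pre : List Char) : ∀ (rest out : List Char),
    (∀ i < pre.length, ¬ ['C', '['] <+: (pre ++ rest).drop i) →
    pvA_main (pre ++ rest) out = out ++ pre ++ pvA_main rest [] := by
  induction pre with
  | nil =>
    intro rest out _
    have := pvA_main_acc rest [] out
    simpa using this
  | cons c pre' ih =>
    intro rest out hno
    have h0 : ¬ (c = 'C' ∧ (pre' ++ rest).head? = some '[') := by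
      intro hc
      exact hno 0 (by simp) (by simpa using (pv_prefix_pair c (pre' ++ rest)).mpr hc)
    rw [show (c :: pre') ++ rest = c :: (pre' ++ rest) by simp, pvA_main, if_neg h0]
    rw [ih rest (out ++ [c]) (fun i hi => by simpa using hno (i + 1) (by simp; omega))]
    simp

theorem pv_find_pair_neg (cs : List Char) (h : PySem.Chars.find cs ['C', '['] = -1) :
    ∀ i, ¬ ['C', '['] <+: cs.drop i := by
  intro i hpre
  exact (PySem.Chars.find_eq_neg_one_iff cs ['C', '[']).mp h
    (hpre.isInfix.trans (List.drop_suffix i cs).isInfix)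

theorem pv_find_pair_pos (cs : List Char) (h : PySem.Chars.find cs ['C', '['] ≠ -1) :
    (∀ i < (PySem.Chars.find cs ['C', '[']).toNat, ¬ ['C', '['] <+: cs.drop i) ∧
      cs.drop (PySem.Chars.find cs ['C', '[']).toNat
        = 'C' :: '[' :: cs.drop ((PySem.Chars.find cs ['C', '[']).toNat + 2) := by
  have h0 : 0 ≤ PySem.Chars.find cs ['C', '['] := by
    have := PySem.Chars.neg_one_le_find cs ['C', '[']
    omega
  obtain ⟨hpre, hmin⟩ := PySem.Chars.find_spec (s := cs) (sub := ['C', '[']) h0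
  refine ⟨hmin, ?_⟩
  set kn := (PySem.Chars.find cs ['C', '[']).toNat
  obtain ⟨t, ht⟩ := hpre
  rw [← ht]
  have : cs.drop (kn + 2) = t := by
    have h1 := List.tail_drop (l := cs) (i := kn)
    have h2 := List.tail_drop (l := cs) (i := kn + 1)
    rw [show kn + 2 = kn + 1 + 1 by omega, ← h2, ← h1, ← ht]
    simp
  rw [this]
  simp

theorem pvAB_main (l : List Char) : pvA_main l [] = pvBmain l := by
  by_cases hk : PySem.Chars.find l ['C', '['] = -1
  · rw [pvBmain, dif_pos hk]
    conv_lhs => rw [show l = l ++ [] by simp]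
    rw [pvA_main_walk l [] [] (fun i _ => by simpa using pv_find_pair_neg l hk i)]
    simp [pvA_main]
  · obtain ⟨hmin, hdrop⟩ := pv_find_pair_pos l hk
    set kn := (PySem.Chars.find l ['C', '[']).toNat with hkn
    set body := l.drop (kn + 2) with hbody
    have hwalk : pvA_main l [] = l.take kn ++ pvA_main (l.drop kn) [] := by
      conv_lhs => rw [← List.take_append_drop kn l]
      rw [pvA_main_walk (l.take kn) (l.drop kn) []
        (fun i hi => by
          rw [List.take_append_drop]
          exact hmin i (by simp at hi; omega))]
      simp
    have hstep : pvA_main (l.drop kn) [] =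
        'C' :: '[' :: (normChars (pvA_value body []).1 ++ [']'])
          ++ pvA_main (pvA_value body []).2 [] := by
      rw [hdrop, pvA_main, if_pos ⟨rfl, rfl⟩]
      show pvA_main (pvA_value body []).2
        ([] ++ 'C' :: '[' :: (normChars (pvA_value body []).1 ++ [']'])) = _
      rw [List.nil_append, show ('C' :: '[' :: (normChars (pvA_value body []).1 ++ [']']))
          = ('C' :: '[' :: (normChars (pvA_value body []).1 ++ [']'])) ++ [] by simp]
      rw [pvA_main_acc _ [] _]
      simp
    rw [pvBmain, dif_neg hk]
    show pvA_main l [] =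
      if pvClose body = -1 then l.take kn ++ 'C' :: '[' :: (normChars body ++ [']'])
      else l.take kn ++ 'C' :: '[' :: (normChars (body.take (pvClose body).toNat) ++ [']'])
        ++ pvBmain (body.drop ((pvClose body).toNat + 1))
    by_cases hc : pvClose body = -1
    · have hval := (pvClose_spec body).1 hc
      rw [if_pos hc, hwalk, hstep, hval]
      simp [pvA_main]
    · obtain ⟨he0, hval⟩ := (pvClose_spec body).2 hc
      rw [if_neg hc, hwalk, hstep, hval]
      rw [pvAB_main (body.drop ((pvClose body).toNat + 1))]
      simp
termination_by l.length
decreasing_by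
  have h2 := pv_find_pair_len l hk
  simp
  omega

-- ===== VERDICT (by name: the statement is the Claim_ definition above) =====
theorem transform_sgf_spec : Claim_equal_transform_sgf := by
  intro text _
  unfold Spec_transform_sgf transform_sgf transform_sgf_alt
  rw [pvAB_main]
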